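-- pv_equiv track=rewrite | github.com/ksubowu/PeptSeqSmi | seq2smi_v2.py | _tokenize_preserve_brackets
-- ===== SOURCE A (Python) =====
-- from typing import Dict, List, Tuple, Optional, Set
--
-- def _tokenize_preserve_brackets(seq: str) -> List[str]:
--     """Split sequence by hyphens while preserving bracketed content."""
--     tokens = []
--     buf = []
--     depth = 0
--     for ch in seq.strip():
--         if ch == '[':
--             depth += 1
--             buf.append(ch)
--         elif ch == ']':
--             depth = max(0, depth - 1)
--             buf.append(ch)
--         elif ch == '-' and depth == 0:
--             tok = ''.join(buf).strip()
--             if tok: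
--                 tokens.append(tok)
--             buf = []
--         else:
--             buf.append(ch)
--     last = ''.join(buf).strip()
--     if last:
--         tokens.append(last)
--     return tokens
-- ===== SOURCE B (Python) =====
-- from typing import List
--
-- def _tokenize_preserve_brackets(seq: str) -> List[str]:
--     """Split sequence by hyphens while preserving bracketed content."""
--     s = seq.strip()
--     cuts = []
--     depth = 0
--     for i, ch in enumerate(s):
--         if ch == '[':
--             depth += 1
--         elif ch == ']':
--             depth = max(0, depth - 1)
--         elif ch == '-' and depth == 0:
--             cuts.append(i)
--     out = []
--     start = 0
--     for c in cuts + [len(s)]: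
--         tok = s[start:c].strip()
--         if tok:
--             out.append(tok)
--         start = c + 1
--     return out
-- ===== Notes on version B (the rewrite author's own statement) =====
-- stated objective: alternative
-- what changed: Replaces A's single pass with an accumulating character buffer by two differently-shaped passes: first collect the indices of top-level hyphens with a depth counter, then slice the stripped string between those cut points, stripping each piece and keeping the non-empty ones.
import Mathlib
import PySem

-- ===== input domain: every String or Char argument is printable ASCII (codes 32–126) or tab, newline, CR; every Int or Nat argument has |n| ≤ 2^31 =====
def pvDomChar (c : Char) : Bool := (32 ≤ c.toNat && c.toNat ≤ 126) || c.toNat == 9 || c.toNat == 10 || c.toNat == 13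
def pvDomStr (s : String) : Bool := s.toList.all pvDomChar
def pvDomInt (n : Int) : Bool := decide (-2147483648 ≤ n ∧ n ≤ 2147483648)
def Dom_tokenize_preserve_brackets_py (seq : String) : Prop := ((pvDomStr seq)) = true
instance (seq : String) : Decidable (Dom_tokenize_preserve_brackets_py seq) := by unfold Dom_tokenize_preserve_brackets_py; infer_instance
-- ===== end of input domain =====

-- B replaces A's accumulating character buffer by two passes — collect top-level hyphen cut
-- indices, then slice/strip/filter between them — an alternative decomposition of the same cost.

-- ===== PORT A =====
-- state: (tokens, buf, depth)
def pvStepA (st : List (List Char) × List Char × Int) (ch : Char) :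
    List (List Char) × List Char × Int :=
  if ch = '[' then (st.1, st.2.1 ++ [ch], st.2.2 + 1)
  else if ch = ']' then (st.1, st.2.1 ++ [ch], max 0 (st.2.2 - 1))
  else if ch = '-' ∧ st.2.2 = 0 then
    (if PySem.Chars.strip st.2.1 ≠ [] then st.1 ++ [PySem.Chars.strip st.2.1] else st.1,
     [], st.2.2)
  else (st.1, st.2.1 ++ [ch], st.2.2)

def tokenize_preserve_brackets_py (seq : String) : List String :=
  let st := (PySem.Chars.strip seq.toList).foldl pvStepA ([], [], 0)
  let last := PySem.Chars.strip st.2.1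
  let tokens := if last ≠ [] then st.1 ++ [last] else st.1
  tokens.map String.ofList

-- ===== PORT B =====
-- first pass: cut indices of top-level hyphens; state: (cuts, depth)
def pvStepCuts (st : List Int × Int) (p : Int × Char) : List Int × Int :=
  if p.2 = '[' then (st.1, st.2 + 1)
  else if p.2 = ']' then (st.1, max 0 (st.2 - 1))
  else if p.2 = '-' ∧ st.2 = 0 then (st.1 ++ [p.1], st.2)
  else (st.1, st.2)

-- second pass: slice between boundaries, strip, keep nonempty; state: (out, start)
def pvStepOut (s : List Char) (st : List (List Char) × Int) (c : Int) :
    List (List Char) × Int :=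
  let tok := PySem.Chars.strip (PySem.List.slice s (some st.2) (some c))
  (if tok ≠ [] then st.1 ++ [tok] else st.1, c + 1)

def tokenize_preserve_brackets_py_alt (seq : String) : List String :=
  let s := PySem.Chars.strip seq.toList
  let cuts := ((PySem.List.enumerate s 0).foldl pvStepCuts ([], 0)).1
  let out := ((cuts ++ [(s.length : Int)]).foldl (pvStepOut s) ([], 0)).1
  out.map String.ofList

-- ===== PRECONDITION & SPEC =====
def Spec_tokenize_preserve_brackets_py (seq : String) (out : List String) : Prop := out = tokenize_preserve_brackets_py_alt seq
instance (seq : String) (out : List String) : Decidable (Spec_tokenize_preserve_brackets_py seq out) := by unfold Spec_tokenize_preserve_brackets_py; infer_instance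

-- ===== CLAIM (what is proved, stated in full; the proofs are below) =====
def Claim_equal_tokenize_preserve_brackets_py : Prop := ∀ (seq : String), Dom_tokenize_preserve_brackets_py seq → Spec_tokenize_preserve_brackets_py seq (tokenize_preserve_brackets_py seq)

-- ===== LEMMAS AND PROOFS =====

-- common spec: the top-level segments of the stripped string
def pvConsHead (ch : Char) : List (List Char) → List (List Char)
  | [] => [[ch]]
  | h :: t => (ch :: h) :: t

def pvSegTop : List Char → Int → List (List Char)
  | [], _ => [[]]
  | ch :: t, d =>
    if ch = '[' then pvConsHead ch (pvSegTop t (d + 1))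
    else if ch = ']' then pvConsHead ch (pvSegTop t (max 0 (d - 1)))
    else if ch = '-' ∧ d = 0 then [] :: pvSegTop t d
    else pvConsHead ch (pvSegTop t d)

def pvFinish (segs : List (List Char)) : List (List Char) :=
  segs.flatMap (fun seg =>
    if PySem.Chars.strip seg ≠ [] then [PySem.Chars.strip seg] else [])

def pvMapHead (f : List Char → List Char) : List (List Char) → List (List Char)
  | [] => []
  | h :: t => f h :: t

def pvFinA (st : List (List Char) × List Char × Int) : List (List Char) :=
  if PySem.Chars.strip st.2.1 ≠ [] then st.1 ++ [PySem.Chars.strip st.2.1] else st.1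

lemma pvConsHead_ne_nil (ch : Char) (L : List (List Char)) : pvConsHead ch L ≠ [] := by
  cases L <;> simp [pvConsHead]

lemma pvSegTop_ne_nil (l : List Char) (d : Int) : pvSegTop l d ≠ [] := by
  cases l with
  | nil => simp [pvSegTop]
  | cons ch t =>
    simp only [pvSegTop]
    split_ifs <;> first | exact pvConsHead_ne_nil _ _ | simp

lemma pvMapHead_consHead (buf : List Char) (ch : Char) (L : List (List Char)) (h : L ≠ []) :
    pvMapHead (fun x => buf ++ x) (pvConsHead ch L)
      = pvMapHead (fun x => (buf ++ [ch]) ++ x) L := by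
  cases L with
  | nil => exact absurd rfl h
  | cons a t => simp [pvConsHead, pvMapHead]

lemma pvMapHead_cons (f : List Char → List Char) (h : List Char) (t : List (List Char)) :
    pvMapHead f (h :: t) = f h :: t := rfl

lemma pvMapHead_id (L : List (List Char)) : pvMapHead (fun x => x) L = L := by
  cases L <;> simp [pvMapHead]

lemma runA_eq (l : List Char) (tokens : List (List Char)) (buf : List Char) (d : Int) :
    pvFinA (l.foldl pvStepA (tokens, buf, d))
      = tokens ++ pvFinish (pvMapHead (fun x => buf ++ x) (pvSegTop l d)) := by
  induction l generalizing tokens buf d with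
  | nil => simp [pvFinA, pvSegTop, pvMapHead, pvFinish]; split_ifs <;> simp
  | cons ch t ih =>
    simp only [List.foldl_cons, pvStepA, pvSegTop]
    by_cases h1 : ch = '['
    · simp only [if_pos h1]
      rw [ih, pvMapHead_consHead _ _ _ (pvSegTop_ne_nil _ _)]
    · by_cases h2 : ch = ']'
      · simp only [if_neg h1, if_pos h2]
        rw [ih, pvMapHead_consHead _ _ _ (pvSegTop_ne_nil _ _)]
      · by_cases h3 : ch = '-' ∧ d = 0
        · simp only [if_neg h1, if_neg h2, if_pos h3]
          obtain ⟨-, hd⟩ := h3; subst hd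
          rw [ih, pvMapHead_cons]
          simp only [List.nil_append, List.append_nil]
          rw [pvMapHead_id]
          simp only [pvFinish, List.flatMap_cons]
          split_ifs <;> simp
        · simp only [if_neg h1, if_neg h2, if_neg h3]
          rw [ih, pvMapHead_consHead _ _ _ (pvSegTop_ne_nil _ _)]

-- B first pass: recursive characterisation of the cut indices
def pvCutsR : List Char → Int → Int → List Int
  | [], _, _ => []
  | ch :: t, d, i =>
    if ch = '[' then pvCutsR t (d + 1) (i + 1)
    else if ch = ']' then pvCutsR t (max 0 (d - 1)) (i + 1)
    else if ch = '-' ∧ d = 0 then i :: pvCutsR t d (i + 1)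
    else pvCutsR t d (i + 1)

lemma cuts_run (l : List Char) (acc : List Int) (d i : Int) :
    ((PySem.List.enumerate l i).foldl pvStepCuts (acc, d)).1 = acc ++ pvCutsR l d i := by
  induction l generalizing acc d i with
  | nil => simp [PySem.List.enumerate_nil, pvCutsR]
  | cons ch t ih =>
    rw [PySem.List.enumerate_cons]
    simp only [List.foldl_cons, pvStepCuts, pvCutsR]
    split_ifs <;> simp [ih]

lemma cuts_ge (l : List Char) (d i : Int) : ∀ c ∈ pvCutsR l d i, i ≤ c := by
  induction l generalizing d i with
  | nil => simp [pvCutsR]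
  | cons ch t ih =>
    intro c hc
    simp only [pvCutsR] at hc
    split_ifs at hc with h1 h2 h3
    · linarith [ih (d + 1) (i + 1) c hc]
    · linarith [ih (max 0 (d - 1)) (i + 1) c hc]
    · rcases List.mem_cons.1 hc with h | h
      · omega
      · linarith [ih d (i + 1) c h]
    · linarith [ih d (i + 1) c hc]

def pvSliceSegs (s : List Char) : Int → List Int → List (List Char)
  | start, [] => [PySem.List.slice s (some start) (some (s.length : Int))]
  | start, c :: cs => PySem.List.slice s (some start) (some c) :: pvSliceSegs s (c + 1) cs

lemma out_run (s : List Char) (cuts : List Int) (out : List (List Char)) (start : Int) :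
    ((cuts ++ [(s.length : Int)]).foldl (pvStepOut s) (out, start)).1
      = out ++ pvFinish (pvSliceSegs s start cuts) := by
  induction cuts generalizing out start with
  | nil =>
    simp only [List.nil_append, List.foldl_cons, List.foldl_nil, pvStepOut,
      pvSliceSegs, pvFinish, List.flatMap_cons, List.flatMap_nil, List.append_nil]
    split_ifs <;> simp
  | cons c cs ih =>
    simp only [List.cons_append, List.foldl_cons, pvStepOut,
      pvSliceSegs, pvFinish, List.flatMap_cons]
    rw [ih]
    simp only [pvFinish]
    split_ifs <;> simp

lemma slice_head (pre t : List Char) (ch : Char) (e : Int)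
    (he : (pre.length : Int) + 1 ≤ e) :
    PySem.List.slice (pre ++ ch :: t) (some (pre.length : Int)) (some e)
      = ch :: PySem.List.slice (pre ++ ch :: t) (some ((pre.length : Int) + 1)) (some e) := by
  rw [PySem.List.slice_toNat _ (by positivity) (by omega),
      PySem.List.slice_toNat _ (by omega) (by omega)]
  have h1 : ((pre.length : Int)).toNat = pre.length := by omega
  have h2 : ((pre.length : Int) + 1).toNat = pre.length + 1 := by omega
  rw [h1, h2]
  have hd : (pre ++ ch :: t).drop pre.length = ch :: t := by
    simp
  have hd2 : (pre ++ ch :: t).drop (pre.length + 1) = t := by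
    rw [← List.drop_drop, hd]; rfl
  rw [hd, hd2]
  have : e.toNat - pre.length = (e.toNat - (pre.length + 1)) + 1 := by omega
  rw [this, List.take_succ_cons]

lemma segs_cons (pre t : List Char) (ch : Char) (L : List Int)
    (hL : ∀ c ∈ L, (pre.length : Int) + 1 ≤ c) :
    pvSliceSegs (pre ++ ch :: t) (pre.length : Int) L
      = pvConsHead ch (pvSliceSegs (pre ++ ch :: t) ((pre.length : Int) + 1) L) := by
  cases L with
  | nil =>
    simp only [pvSliceSegs, pvConsHead]
    rw [slice_head pre t ch _ (by simp only [List.length_append, List.length_cons]; push_cast; omega)]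
  | cons c cs =>
    simp only [pvSliceSegs, pvConsHead]
    rw [slice_head pre t ch c (hL c (List.mem_cons_self ..))]

lemma core (l : List Char) (d : Int) (pre : List Char) :
    pvSliceSegs (pre ++ l) (pre.length : Int) (pvCutsR l d (pre.length : Int))
      = pvSegTop l d := by
  induction l generalizing d pre with
  | nil =>
    simp only [pvCutsR, pvSliceSegs, pvSegTop, List.append_nil]
    rw [PySem.List.slice_natCast]
    simp
  | cons ch t ih =>
    have hlen : (pre.length : Int) + 1 = (((pre ++ [ch]).length : Nat) : Int) := by
      simp
    have hs : pre ++ ch :: t = (pre ++ [ch]) ++ t := by simp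
    simp only [pvCutsR, pvSegTop]
    split_ifs with h1 h2 h3
    · rw [segs_cons pre t ch _ (cuts_ge t _ _), hlen, hs, ih]
    · rw [segs_cons pre t ch _ (cuts_ge t _ _), hlen, hs, ih]
    · obtain ⟨he, hd⟩ := h3; subst he hd
      simp only [pvSliceSegs]
      rw [PySem.List.slice_natCast]
      simp only [Nat.sub_self, List.take_zero]
      rw [hlen, hs, ih]
    · rw [segs_cons pre t ch _ (cuts_ge t _ _), hlen, hs, ih]

-- ===== VERDICT (by name: the statement is the Claim_ definition above) =====
theorem tokenize_preserve_brackets_py_spec : Claim_equal_tokenize_preserve_brackets_py := by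
  intro seq _
  unfold Spec_tokenize_preserve_brackets_py
  have hA : tokenize_preserve_brackets_py seq
      = (pvFinA ((PySem.Chars.strip seq.toList).foldl pvStepA ([], [], 0))).map String.ofList := rfl
  have hB : tokenize_preserve_brackets_py_alt seq
      = ((((PySem.List.enumerate (PySem.Chars.strip seq.toList) 0).foldl pvStepCuts ([], 0)).1
          ++ [((PySem.Chars.strip seq.toList).length : Int)]).foldl
          (pvStepOut (PySem.Chars.strip seq.toList)) ([], 0)).1.map String.ofList := rfl
  rw [hA, hB, runA_eq, cuts_run, out_run]
  have hcore := core (PySem.Chars.strip seq.toList) 0 []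
  simp only [List.length_nil, Int.natCast_zero, List.nil_append] at hcore
  simp only [List.nil_append]
  rw [hcore, pvMapHead_id]
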